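-- pv_equiv track=rewrite | github.com/Iftekhar-mobin/AI-system | retrieval_Model/Page_Ranking_Experiment/pipelines/corpus_handling_methods.py | fixed_length_sentence
-- ===== SOURCE A (Python) =====
-- def fixed_length_sentence(contents, word_limit):
--     contents_list = contents.split()
--     end = len(contents_list)
--     count = 0
--     collector = []
--     line = []
--     for items in contents_list:
--         if count < word_limit-1 and end > 1:
--             collector.append(items)
--             count += 1
--         else:
--             collector.append(items)
--             line.append(' '.join(collector))
--             collector = []
--             count = 0
--         end -= 1
--     return line
-- ===== SOURCE B (Python) =====
-- def fixed_length_sentence(contents, word_limit):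
--     words = contents.split()
--     step = max(word_limit, 1)
--     return [' '.join(words[i:i + step]) for i in range(0, len(words), step)]
-- ===== Notes on version B (the rewrite author's own statement) =====
-- stated objective: idiomatic
-- what changed: Replaces the counter-and-flush accumulator loop (with its decrementing 'end' sentinel) by a single stride-indexed slicing comprehension: one chunk of max(word_limit,1) words per start index.
import Mathlib
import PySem

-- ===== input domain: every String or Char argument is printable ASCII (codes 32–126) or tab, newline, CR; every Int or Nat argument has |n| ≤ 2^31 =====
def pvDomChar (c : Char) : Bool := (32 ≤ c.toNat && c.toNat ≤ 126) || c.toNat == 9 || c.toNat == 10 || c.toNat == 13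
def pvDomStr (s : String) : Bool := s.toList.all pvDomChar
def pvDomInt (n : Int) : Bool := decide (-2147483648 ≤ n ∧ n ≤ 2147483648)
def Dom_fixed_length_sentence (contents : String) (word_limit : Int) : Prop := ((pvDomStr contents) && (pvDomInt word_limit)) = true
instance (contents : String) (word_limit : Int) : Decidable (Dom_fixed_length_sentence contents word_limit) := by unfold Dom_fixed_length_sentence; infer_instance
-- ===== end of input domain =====

-- B replaces A's counter-and-flush accumulator loop by a stride-indexed slicing comprehension (more idiomatic, same cost).

-- ===== PORT A =====
def fixed_length_sentence (contents : String) (word_limit : Int) : List String :=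
  let contents_list := PySem.Str.split₀ contents
  -- state: (end, count, collector, line)
  (contents_list.foldl
    (fun st items =>
      let e := st.1; let count := st.2.1; let collector := st.2.2.1; let line := st.2.2.2
      if count < word_limit - 1 ∧ e > 1 then
        (e - 1, count + 1, collector ++ [items], line)
      else
        (e - 1, 0, ([] : List String), line ++ [PySem.Str.join " " (collector ++ [items])]))
    (((contents_list.length : Int), 0, [], []) : Int × Int × List String × List String)).2.2.2

-- ===== PORT B =====
def fixed_length_sentence_alt (contents : String) (word_limit : Int) : List String :=
  let words := PySem.Str.split₀ contents
  let step := max word_limit 1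
  (PySem.List.pyRange 0 (words.length : Int) step).map
    (fun i => PySem.Str.join " " (PySem.List.slice words (some i) (some (i + step))))

-- ===== PRECONDITION & SPEC =====
def Spec_fixed_length_sentence (contents : String) (word_limit : Int) (out : List String) : Prop := out = fixed_length_sentence_alt contents word_limit
instance (contents : String) (word_limit : Int) (out : List String) : Decidable (Spec_fixed_length_sentence contents word_limit out) := by unfold Spec_fixed_length_sentence; infer_instance

-- ===== CLAIM (what is proved, stated in full; the proofs are below) =====
def Claim_equal_fixed_length_sentence : Prop := ∀ (contents : String) (word_limit : Int), Dom_fixed_length_sentence contents word_limit → Spec_fixed_length_sentence contents word_limit (fixed_length_sentence contents word_limit)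

-- ===== LEMMAS AND PROOFS =====

-- chunks s ws: ws cut into consecutive blocks of s+1 words each (last one possibly shorter)
def pvChunks (s : Nat) : List String → List (List String)
  | [] => []
  | w :: ws => (w :: ws.take s) :: pvChunks s (ws.drop s)
termination_by l => l.length
decreasing_by simp

-- A's loop, written as a recursion over the remaining word list (end > 1 ⟺ tail nonempty)
def pvLoopA (wl : Int) : List String → Int → List String → List String → List String
  | [], _, _, line => line
  | w :: ws, c, coll, line =>
    if c < wl - 1 ∧ ws ≠ [] then pvLoopA wl ws (c + 1) (coll ++ [w]) line
    else pvLoopA wl ws 0 [] (line ++ [PySem.Str.join " " (coll ++ [w])])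

-- positive-step pyRange unfolds one element at a time
theorem pvPyRange_pos_nil (a b s : Int) (hs : 0 < s) (hab : b ≤ a) :
    PySem.List.pyRange a b s = [] := by
  rw [PySem.List.pyRange_of_pos a b hs]
  simp [show ¬ a < b by omega]

theorem pvPyRange_pos_cons (a b s : Int) (hs : 0 < s) (hab : a < b) :
    PySem.List.pyRange a b s = a :: PySem.List.pyRange (a + s) b s := by
  rw [PySem.List.pyRange_of_pos a b hs, PySem.List.pyRange_of_pos (a + s) b hs]
  have hcount : (if a < b then ((b - a + s - 1) / s).toNat else 0)
      = (if a + s < b then ((b - (a + s) + s - 1) / s).toNat else 0) + 1 := by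
    rw [if_pos hab]
    by_cases h : a + s < b
    · rw [if_pos h]
      have : b - a + s - 1 = (b - (a + s) + s - 1) + 1 * s := by ring
      rw [this, Int.add_mul_ediv_right _ _ (by omega : s ≠ 0)]
      have h0 : 0 ≤ (b - (a + s) + s - 1) / s := Int.ediv_nonneg (by omega) (by omega)
      omega
    · rw [if_neg h]
      have : (b - a + s - 1) / s = (b - a - 1) / s + 1 := by
        have : b - a + s - 1 = (b - a - 1) + 1 * s := by ring
        rw [this, Int.add_mul_ediv_right _ _ (by omega : s ≠ 0)]
      rw [this, Int.ediv_eq_zero_of_lt (by omega) (by omega)]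
      omega
  rw [hcount, List.range_succ_eq_map]
  simp only [List.map_cons, List.map_map, Nat.cast_zero, mul_zero, add_zero]
  congr 1
  apply List.map_congr_left
  intro k _
  simp [Function.comp, Nat.succ_eq_add_one]
  ring

-- B's comprehension computes the joined chunks: window starting at index k of `full` covers chunks of full.drop k
theorem pvB_eq_chunks (s : Nat) (full : List String) :
    ∀ (n : Nat) (ws : List String) (k : Nat), ws.length ≤ n → full.drop k = ws →
    (PySem.List.pyRange (k : Int) (full.length : Int) ((s : Int) + 1)).map
        (fun i => PySem.Str.join " " (PySem.List.slice full (some i) (some (i + ((s : Int) + 1)))))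
      = (pvChunks s ws).map (PySem.Str.join " ") := by
  intro n
  induction n with
  | zero =>
    intro ws k hn hdrop
    have hws : ws = [] := List.eq_nil_of_length_eq_zero (by omega)
    subst hws
    have hk : full.length ≤ k := by
      have := List.drop_eq_nil_iff.mp hdrop; omega
    rw [pvPyRange_pos_nil _ _ _ (by omega) (by exact_mod_cast hk)]
    simp [pvChunks]
  | succ n ih =>
    intro ws k hn hdrop
    match ws with
    | [] =>
      have hk : full.length ≤ k := by
        have := List.drop_eq_nil_iff.mp hdrop; omega
      rw [pvPyRange_pos_nil _ _ _ (by omega) (by exact_mod_cast hk)]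
      simp [pvChunks]
    | w :: rest =>
      have hk : k < full.length := by
        by_contra h
        have : full.drop k = [] := List.drop_eq_nil_iff.mpr (by omega)
        rw [hdrop] at this; simp at this
      rw [pvPyRange_pos_cons _ _ _ (by omega) (by exact_mod_cast hk)]
      rw [List.map_cons]
      have hslice : PySem.List.slice full (some (k : Int)) (some ((k : Int) + ((s : Int) + 1)))
          = (w :: rest).take (s + 1) := by
        have hcast : (k : Int) + ((s : Int) + 1) = ((k + (s + 1) : Nat) : Int) := by push_cast; ring
        rw [hcast]
        have := PySem.List.slice_natCast (xs := full) (a := k) (b := k + (s + 1))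
        rw [this, hdrop]
        congr 1
        omega
      rw [hslice]
      have hrec : (PySem.List.pyRange ((k : Int) + ((s : Int) + 1)) (full.length : Int) ((s : Int) + 1)).map
            (fun i => PySem.Str.join " " (PySem.List.slice full (some i) (some (i + ((s : Int) + 1)))))
          = (pvChunks s (rest.drop s)).map (PySem.Str.join " ") := by
        have hcast : (k : Int) + ((s : Int) + 1) = ((k + (s + 1) : Nat) : Int) := by push_cast; ring
        rw [hcast]
        apply ih (rest.drop s) (k + (s + 1))
        · have : rest.length ≤ n := by
            have := hn; simp at this; omega
          have := List.length_drop (l := rest) (i := s)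
          omega
        · rw [← List.drop_drop, hdrop]
          simp [List.drop_succ_cons]
      rw [hrec]
      rw [show pvChunks s (w :: rest) = (w :: rest.take s) :: pvChunks s (rest.drop s) from by simp [pvChunks]]
      simp [List.take_succ_cons]

-- the fold in port A is pvLoopA, provided the `end` component equals the remaining length
theorem pvFold_eq_loopA (wl : Int) :
    ∀ (ws : List String) (c : Int) (coll line : List String),
    (ws.foldl
      (fun st items =>
        let e := st.1; let count := st.2.1; let collector := st.2.2.1; let line := st.2.2.2
        if count < wl - 1 ∧ e > 1 then
          (e - 1, count + 1, collector ++ [items], line)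
        else
          (e - 1, 0, ([] : List String), line ++ [PySem.Str.join " " (collector ++ [items])]))
      (((ws.length : Int), c, coll, line) : Int × Int × List String × List String)).2.2.2
    = pvLoopA wl ws c coll line := by
  intro ws
  induction ws with
  | nil => intro c coll line; simp [pvLoopA]
  | cons w rest ih =>
    intro c coll line
    rw [List.foldl_cons, pvLoopA]
    by_cases hrest : rest = []
    · subst hrest
      have : ¬ (c < wl - 1 ∧ (([w] : List String).length : Int) > 1) := by simp
      simp only [List.length_cons, List.length_nil]
      rw [if_neg (by simp), if_neg (by simp)]
      have h1 : ((0 + 1 : Nat) : Int) - 1 = ((0 : Nat) : Int) := by norm_num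
      simpa [h1] using ih 0 [] (line ++ [PySem.Str.join " " (coll ++ [w])])
    · have he : (((w :: rest).length : Int)) > 1 := by
        have : 1 ≤ rest.length := List.length_pos_iff.mpr hrest
        simp only [List.length_cons]; push_cast; omega
      have hlen : (((w :: rest).length : Int)) - 1 = ((rest.length : Nat) : Int) := by
        simp only [List.length_cons]; push_cast; ring
      by_cases hc : c < wl - 1
      · rw [if_pos ⟨hc, he⟩, if_pos ⟨hc, hrest⟩]
        simpa [hlen] using ih (c + 1) (coll ++ [w]) line
      · rw [if_neg (by tauto), if_neg (by tauto)]
        simpa [hlen] using ih 0 [] (line ++ [PySem.Str.join " " (coll ++ [w])])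

-- pvLoopA flushes its first chunk after (wl-1-c).toNat + 1 words, then restarts with capacity s+1
theorem pvLoopA_eq (wl : Int) (s : Nat) (hs : ((s : Int) + 1) = max wl 1) :
    ∀ (n : Nat) (ws : List String) (c : Int) (coll line : List String), ws.length ≤ n → ws ≠ [] →
    pvLoopA wl ws c coll line
      = line ++ PySem.Str.join " " (coll ++ ws.take ((wl - 1 - c).toNat + 1))
          :: (pvChunks s (ws.drop ((wl - 1 - c).toNat + 1))).map (PySem.Str.join " ") := by
  intro n
  induction n with
  | zero =>
    intro ws c coll line hn hne
    exact absurd (List.eq_nil_of_length_eq_zero (by omega)) hne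
  | succ n ih =>
    intro ws c coll line hn hne
    match ws with
    | [] => exact absurd rfl hne
    | w :: rest =>
      rw [pvLoopA]
      by_cases hcond : c < wl - 1 ∧ rest ≠ []
      · rw [if_pos hcond]
        have hrlen : rest.length ≤ n := by simp at hn; omega
        rw [ih rest (c + 1) (coll ++ [w]) line hrlen hcond.2]
        have ht : (wl - 1 - c).toNat + 1 = ((wl - 1 - (c + 1)).toNat + 1) + 1 := by omega
        rw [ht]
        simp [List.take_succ_cons, List.drop_succ_cons]
      · rw [if_neg hcond]
        have ht : (wl - 1 - c).toNat + 1 = (wl - 1 - c).toNat + 1 := rfl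
        by_cases hrest : rest = []
        · subst hrest
          rw [pvLoopA]
          have h1 : List.take ((wl - 1 - c).toNat + 1) [w] = [w] :=
            List.take_of_length_le (by simp)
          have h2 : List.drop ((wl - 1 - c).toNat + 1) [w] = ([] : List String) :=
            List.drop_of_length_le (by simp)
          simp [pvChunks, h1, h2]
        · -- c ≥ wl - 1, so the first chunk is just [w]
          have hc : ¬ c < wl - 1 := by tauto
          have htoNat : (wl - 1 - c).toNat = 0 := by omega
          have hrlen : rest.length ≤ n := by simp at hn; omega
          rw [ih rest 0 [] (line ++ [PySem.Str.join " " (coll ++ [w])]) hrlen hrest]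
          have ht0 : (wl - 1 - 0).toNat + 1 = s + 1 := by omega
          rw [ht0, htoNat]
          simp only [zero_add, List.take_succ_cons, List.take_zero, List.drop_succ_cons,
            List.drop_zero]
          match rest, hrest with
          | w' :: rest', _ =>
            rw [show pvChunks s (w' :: rest') = (w' :: rest'.take s) :: pvChunks s (rest'.drop s) from by simp [pvChunks]]
            simp [List.take_succ_cons, List.drop_succ_cons]

-- ===== VERDICT (by name: the statement is the Claim_ definition above) =====
theorem fixed_length_sentence_spec : Claim_equal_fixed_length_sentence := by
  intro contents wl _
  unfold Spec_fixed_length_sentence fixed_length_sentence fixed_length_sentence_alt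
  set words := PySem.Str.split₀ contents with hwords
  simp only []
  set s : Nat := (max wl 1 - 1).toNat with hsdef
  have hs : ((s : Int) + 1) = max wl 1 := by
    have : (1 : Int) ≤ max wl 1 := le_max_right _ _
    omega
  have hB := pvB_eq_chunks s words words.length words 0 (le_refl _) (by simp)
  rw [pvFold_eq_loopA wl words 0 [] []]
  simp only [Nat.cast_zero] at hB
  rw [← hs]
  rw [hB]
  match words with
  | [] => simp [pvLoopA, pvChunks]
  | w :: rest =>
    rw [pvLoopA_eq wl s hs (w :: rest).length (w :: rest) 0 [] [] (le_refl _) (by simp)]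
    have ht0 : (wl - 1 - 0).toNat + 1 = s + 1 := by omega
    rw [ht0]
    rw [show pvChunks s (w :: rest) = (w :: rest.take s) :: pvChunks s (rest.drop s) from by simp [pvChunks]]
    simp [List.take_succ_cons, List.drop_succ_cons]
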